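-- pv_equiv track=rewrite | github.com/mllhild/Game-Building-Blocks | Randomness and Percentages/Pseudo Random Binary.py | has_run
-- ===== SOURCE A (Python) =====
-- def has_run(sequence, run_length):
--     if len(sequence) < run_length:
--         return False
--     count = 1
--     for i in range(len(sequence) - 1, 0, -1):
--         if sequence[i] == sequence[i - 1]:
--             count += 1
--             if count >= run_length:
--                 return True
--         else:
--             break
--     return False
-- ===== SOURCE B (Python) =====
-- def has_run(sequence, run_length):
--     # Single forward pass maintaining the length L of the current run of equal
--     # elements; after the loop L is the trailing-run length.  A's early-exit
--     # backward scan returns True exactly when L >= 2 and L >= run_length.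
--     L = 0
--     prev = None
--     for x in sequence:
--         L = L + 1 if L and x == prev else 1
--         prev = x
--     return L >= 2 and L >= run_length
-- ===== Notes on version B (the rewrite author's own statement) =====
-- stated objective: alternative
-- what changed: B replaces A's guarded backward index loop with early return by a single forward fold that maintains the current run length, then compares the trailing-run length against max(2, run_length) once.
import Mathlib
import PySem

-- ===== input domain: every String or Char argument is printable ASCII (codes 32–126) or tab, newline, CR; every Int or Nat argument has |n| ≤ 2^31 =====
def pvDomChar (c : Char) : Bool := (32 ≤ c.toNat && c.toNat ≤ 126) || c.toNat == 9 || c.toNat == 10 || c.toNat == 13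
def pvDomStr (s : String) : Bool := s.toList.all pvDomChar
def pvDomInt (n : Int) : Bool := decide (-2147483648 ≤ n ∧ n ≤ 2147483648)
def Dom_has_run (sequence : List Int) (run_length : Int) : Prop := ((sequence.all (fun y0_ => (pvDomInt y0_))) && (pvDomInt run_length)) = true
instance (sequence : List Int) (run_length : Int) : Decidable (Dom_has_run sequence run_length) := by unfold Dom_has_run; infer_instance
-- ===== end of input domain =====

-- B replaces A's guarded backward index loop (early return) with one forward fold
-- maintaining the current run length; same O(n) cost, different decomposition.

-- ===== PORT A =====
-- the 'for i in range(len(sequence)-1, 0, -1)' loop with early returns / break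
def hasRunLoopA (sequence : List Int) (run_length : Int) : Int → List Int → Bool
  | _, [] => false
  | count, i :: rest =>
    if PySem.List.pyGet? sequence i = PySem.List.pyGet? sequence (i - 1) then
      if run_length ≤ count + 1 then true
      else hasRunLoopA sequence run_length (count + 1) rest
    else false

def has_run (sequence : List Int) (run_length : Int) : Bool :=
  if (sequence.length : Int) < run_length then false
  else hasRunLoopA sequence run_length 1
        (PySem.List.pyRange ((sequence.length : Int) - 1) 0 (-1))

-- ===== PORT B =====
-- state (L, prev): 'L = L + 1 if L and x == prev else 1; prev = x'
def hasRunStep (st : Int × Option Int) (x : Int) : Int × Option Int :=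
  ((if st.1 ≠ 0 ∧ st.2 = some x then st.1 + 1 else 1), some x)

def has_run_alt (sequence : List Int) (run_length : Int) : Bool :=
  let L := (sequence.foldl hasRunStep (0, none)).1
  decide (2 ≤ L ∧ run_length ≤ L)

-- ===== PRECONDITION & SPEC =====
def Spec_has_run (sequence : List Int) (run_length : Int) (out : Bool) : Prop := out = has_run_alt sequence run_length
instance (sequence : List Int) (run_length : Int) (out : Bool) : Decidable (Spec_has_run sequence run_length out) := by unfold Spec_has_run; infer_instance

-- ===== CLAIM (what is proved, stated in full; the proofs are below) =====
def Claim_equal_has_run : Prop := ∀ (sequence : List Int) (run_length : Int), Dom_has_run sequence run_length → Spec_has_run sequence run_length (has_run sequence run_length)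

-- ===== LEMMAS AND PROOFS =====

-- length of the leading run of y's in a list, given the run's first element x
def leadCnt (x : Int) : List Int → Int
  | [] => 0
  | y :: ys => if y = x then 1 + leadCnt x ys else 0

-- length of the leading run of a list
def leadRun : List Int → Int
  | [] => 0
  | x :: xs => 1 + leadCnt x xs

theorem leadCnt_nonneg (x : Int) (l : List Int) : 0 ≤ leadCnt x l := by
  induction l with
  | nil => simp [leadCnt]
  | cons y ys ih => simp only [leadCnt]; split <;> omega

theorem leadCnt_le_length (x : Int) (l : List Int) : leadCnt x l ≤ l.length := by
  induction l with
  | nil => simp [leadCnt]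
  | cons y ys ih => simp only [leadCnt, List.length_cons]; split <;> push_cast <;> omega

theorem leadRun_le_length (l : List Int) : leadRun l ≤ l.length := by
  cases l with
  | nil => simp [leadRun]
  | cons x xs =>
    simp only [leadRun, List.length_cons]
    have := leadCnt_le_length x xs; push_cast; omega

-- B's fold computes (trailing-run length, last element)
theorem foldB_eq (l : List Int) :
    l.foldl hasRunStep (0, none) = (leadRun l.reverse, l.getLast?) := by
  induction l using List.reverseRecOn with
  | nil => simp [leadRun]
  | append_singleton m x ih =>
    rw [List.foldl_append, ih]
    simp only [List.foldl_cons, List.foldl_nil, List.getLast?_append_cons,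
      List.getLast?_singleton, List.reverse_append, List.reverse_cons,
      List.reverse_nil, List.nil_append, List.singleton_append]
    cases hm : m.reverse with
    | nil =>
      have : m = [] := by simpa using congrArg List.reverse hm
      subst this
      simp [hasRunStep, leadRun, leadCnt]
    | cons h t =>
      have hlast : m.getLast? = some h := by
        rw [← List.head?_reverse, hm]; rfl
      have hpos : 0 ≤ leadCnt h t := leadCnt_nonneg h t
      by_cases hx : h = x
      · subst hx
        simp [hasRunStep, hlast, leadRun, leadCnt]
        omega
      · simp [hasRunStep, hlast, leadRun, leadCnt, hx]

-- run length downward from index i in A's indexing scheme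
def downRun (l : List Int) : Nat → Int
  | 0 => 0
  | i + 1 =>
    if PySem.List.pyGet? l ((i : Int) + 1) = PySem.List.pyGet? l (i : Int)
    then 1 + downRun l i else 0

theorem downRun_nonneg (l : List Int) (i : Nat) : 0 ≤ downRun l i := by
  induction i with
  | zero => simp [downRun]
  | succ i ih => simp only [downRun]; split <;> omega

-- A's loop over range(i, 0, -1) decided by downRun
theorem loopA_char (l : List Int) (rl : Int) (i : Nat) (c : Int) :
    hasRunLoopA l rl c (PySem.List.pyRange (i : Int) 0 (-1)) =
      decide (1 ≤ downRun l i ∧ rl ≤ c + downRun l i) := by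
  induction i generalizing c with
  | zero =>
    rw [PySem.List.pyRange_neg_one_eq_nil (by omega)]
    simp [hasRunLoopA, downRun]
  | succ i ih =>
    have hcast : ((i + 1 : Nat) : Int) = (i : Int) + 1 := by push_cast; ring
    rw [hcast, PySem.List.pyRange_neg_one_cons (by omega)]
    have h1 : (i : Int) + 1 - 1 = (i : Int) := by ring
    simp only [hasRunLoopA, h1, downRun]
    have hd := downRun_nonneg l i
    by_cases heq : PySem.List.pyGet? l ((i : Int) + 1) = PySem.List.pyGet? l (i : Int)
    · simp only [heq, if_true]
      by_cases hrl : rl ≤ c + 1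
      · simp only [hrl, if_true]
        have : (1:Int) ≤ 1 + downRun l i ∧ rl ≤ c + (1 + downRun l i) := by omega
        simp [this]
      · simp only [hrl, if_false, ih (c + 1)]
        rw [decide_eq_decide]
        omega
    · simp only [heq, if_false]
      simp

-- downRun over an extended list agrees on prefix indices
theorem downRun_append (p t : List Int) (i : Nat) (h : i < p.length) :
    downRun (p ++ t) i = downRun p i := by
  induction i with
  | zero => simp [downRun]
  | succ i ih =>
    have h2 : ((i : Int) + 1) = ((i + 1 : Nat) : Int) := by push_cast; ring
    simp only [downRun, h2, PySem.List.pyGet?_natCast]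
    rw [List.getElem?_append_left (by omega), List.getElem?_append_left (by omega),
      ih (by omega)]

-- trailing run of l (as leading run of its reverse) equals 1 + downRun at the top index
theorem downRun_eq (m : List Int) (x : Int) :
    1 + downRun (m ++ [x]) m.length = leadRun (x :: m.reverse) := by
  induction m using List.reverseRecOn with
  | nil => simp [downRun, leadRun, leadCnt]
  | append_singleton m' y ih =>
    have hlen : (m' ++ [y]).length = m'.length + 1 := by simp
    rw [hlen]
    have hx : PySem.List.pyGet? ((m' ++ [y]) ++ [x]) (((m'.length : Int)) + 1)
        = some x := by
      have h2 : ((m'.length : Int)) + 1 = (((m' ++ [y]).length : Nat) : Int) := by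
        simp
      rw [h2, PySem.List.pyGet?_natCast]
      simp
    have hy : PySem.List.pyGet? ((m' ++ [y]) ++ [x]) ((m'.length : Int))
        = some y := by
      have : (m' ++ [y]) ++ [x] = m' ++ (y :: [x]) := by simp
      rw [this]
      exact PySem.List.pyGet?_append_length m' [x] y
    simp only [downRun, hx, hy, List.reverse_append, List.reverse_cons,
      List.reverse_nil, List.nil_append, List.singleton_append]
    rw [List.append_assoc]
    have hpre : downRun (m' ++ ([y] ++ [x])) m'.length
        = downRun (m' ++ [y]) m'.length := by
      rw [← List.append_assoc]
      rw [downRun_append (m' ++ [y]) [x] m'.length (by simp)]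
    rw [hpre]
    by_cases hyx : y = x
    · subst hyx
      have ih' := ih
      simp only [leadRun] at ih'
      simp only [leadRun, leadCnt, if_true]
      omega
    · have hne' : ¬ (some x = some y) := by simpa using Ne.symm hyx
      simp [hne', leadRun, leadCnt, hyx]

-- the two ports computed in closed form
theorem hasRun_alt_char (l : List Int) (rl : Int) :
    has_run_alt l rl = decide (2 ≤ leadRun l.reverse ∧ rl ≤ leadRun l.reverse) := by
  simp only [has_run_alt, foldB_eq]

theorem hasRun_char (l : List Int) (rl : Int) :
    has_run l rl = decide (2 ≤ leadRun l.reverse ∧ rl ≤ leadRun l.reverse) := by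
  cases l with
  | nil =>
    simp only [has_run, List.length_nil, Nat.cast_zero, leadRun, List.reverse_nil]
    split
    · simp
    · rw [show (0:Int) - 1 = -1 by ring,
        PySem.List.pyRange_neg_one_eq_nil (by omega)]
      simp [hasRunLoopA]
  | cons a as =>
    have hne : a :: as ≠ ([] : List Int) := by simp
    set l := a :: as with hl
    have hlen : 1 ≤ l.length := by simp [hl]
    have hT : leadRun l.reverse ≤ l.length := by
      have := leadRun_le_length l.reverse
      simpa using this
    have hidx : ((l.length : Int)) - 1 = ((l.length - 1 : Nat) : Int) := by
      push_cast [hlen]; ring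
    have hdown : 1 + downRun l (l.length - 1) = leadRun l.reverse := by
      obtain ⟨m, x, hmx⟩ : ∃ m x, l = m ++ [x] := by
        rcases List.eq_nil_or_concat l with h | ⟨m, x, h⟩
        · exact absurd h hne
        · exact ⟨m, x, by simpa using h⟩
      rw [hmx]
      have : (m ++ [x]).length - 1 = m.length := by simp
      rw [this, downRun_eq]
      simp
    simp only [has_run, hidx, loopA_char]
    have hdn := downRun_nonneg l (l.length - 1)
    split
    · rename_i hlt
      rw [eq_comm, decide_eq_false_iff_not]
      omega
    · rename_i hge
      rw [decide_eq_decide]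
      omega

-- ===== VERDICT (by name: the statement is the Claim_ definition above) =====
theorem has_run_spec : Claim_equal_has_run := by
  intro sequence run_length _
  unfold Spec_has_run
  rw [hasRun_char, hasRun_alt_char]
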